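-- pv_equiv track=rewrite | github.com/hansstanley/leetcode | 36_valid_sudoku.py | is_valid_list
-- ===== SOURCE A (Python) =====
-- from typing import List
--
-- def is_valid_list(nums: List[str]) -> bool:
--     seen = set()
--     for n in nums:
--         if n == ".":
--             continue
--         if n in seen:
--             return False
--         seen.add(n)
--     return True
-- ===== SOURCE B (Python) =====
-- def is_valid_list(nums):
--     filtered = sorted(n for n in nums if n != ".")
--     return all(a != b for a, b in zip(filtered, filtered[1:]))
-- ===== Notes on version B (the rewrite author's own statement) =====
-- stated objective: alternative
-- what changed: Replaces A's hash-set membership loop with a sort-based duplicate check: sort the non-dot entries and verify that no two adjacent elements are equal, so no set is used at all.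
import Mathlib
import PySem

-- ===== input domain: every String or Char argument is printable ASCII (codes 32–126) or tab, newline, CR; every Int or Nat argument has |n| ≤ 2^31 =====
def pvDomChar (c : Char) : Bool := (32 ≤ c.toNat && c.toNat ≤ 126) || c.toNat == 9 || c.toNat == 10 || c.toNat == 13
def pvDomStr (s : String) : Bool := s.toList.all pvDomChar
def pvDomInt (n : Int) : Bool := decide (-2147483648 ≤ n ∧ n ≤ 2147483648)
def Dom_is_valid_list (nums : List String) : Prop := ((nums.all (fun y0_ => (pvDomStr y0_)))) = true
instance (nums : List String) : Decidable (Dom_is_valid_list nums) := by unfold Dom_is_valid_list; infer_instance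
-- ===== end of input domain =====

-- B uses a sort-based duplicate check (sort the non-dot entries, compare adjacent pairs)
-- instead of A's incremental seen-set loop with early return (objective: alternative).

-- ===== PORT A =====
-- the for-loop with its 'seen' set and early 'return False', as structural recursion
def isValidLoop (nums : List String) (seen : PySem.Set String) : Bool :=
  match nums with
  | [] => true
  | n :: rest =>
    if n == "." then isValidLoop rest seen
    else if PySem.Set.contains seen n then false
    else isValidLoop rest (PySem.Set.add seen n)

def is_valid_list (nums : List String) : Bool :=
  isValidLoop nums PySem.Set.empty

-- ===== PORT B =====
-- filtered[1:] is ported as drop 1 (equal on lists); zip/all as List.zip/List.all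
def is_valid_list_alt (nums : List String) : Bool :=
  let filtered := PySem.List.sorted (nums.filter (fun n => n != ".")) (fun x => x) false
  (filtered.zip (filtered.drop 1)).all (fun p => p.1 != p.2)

-- ===== PRECONDITION & SPEC =====
def Spec_is_valid_list (nums : List String) (out : Bool) : Prop := out = is_valid_list_alt nums
instance (nums : List String) (out : Bool) : Decidable (Spec_is_valid_list nums out) := by unfold Spec_is_valid_list; infer_instance

-- ===== CLAIM (what is proved, stated in full; the proofs are below) =====
def Claim_equal_is_valid_list : Prop := ∀ (nums : List String), Dom_is_valid_list nums → Spec_is_valid_list nums (is_valid_list nums)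

-- ===== LEMMAS AND PROOFS =====

-- A's loop returns true iff the non-dot entries are duplicate-free and disjoint from 'seen'
theorem isValidLoop_iff (nums : List String) (s : PySem.Set String) :
    isValidLoop nums s = true ↔
      ((nums.filter (fun n => n != ".")).Nodup ∧
        ∀ x ∈ nums.filter (fun n => n != "."), x ∉ s) := by
  induction nums generalizing s with
  | nil => simp [isValidLoop]
  | cons n rest ih =>
    by_cases hdot : n = "."
    · subst hdot; simp [isValidLoop, ih]
    · have hne : (n != ".") = true := by simp [hdot]
      rw [isValidLoop]
      simp only [List.filter_cons, hne, beq_iff_eq, if_neg hdot]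
      by_cases hc : PySem.Set.contains s n = true
      · have hmem : n ∈ s := (PySem.Set.contains_iff s n).mp hc
        simp only [hc]
        constructor
        · intro h; exact absurd h (by simp)
        · rintro ⟨-, hall⟩
          exact absurd hmem (hall n (List.mem_cons_self ..))
      · rw [if_neg hc, ih]
        have hnmem : n ∉ s := fun h => hc ((PySem.Set.contains_iff s n).mpr h)
        constructor
        · rintro ⟨hnd, hall⟩
          refine ⟨List.nodup_cons.mpr ⟨fun hx => ?_, hnd⟩, ?_⟩
          · exact (hall n hx) ((PySem.Set.mem_add s n n).mpr (Or.inr rfl))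
          · intro x hx
            rcases List.mem_cons.mp hx with rfl | hx'
            · exact hnmem
            · intro hxs
              exact hall x hx' ((PySem.Set.mem_add s n x).mpr (Or.inl hxs))
        · rintro ⟨hnd, hall⟩
          rcases List.nodup_cons.mp hnd with ⟨hnin, hnd'⟩
          refine ⟨hnd', fun x hx hxadd => ?_⟩
          rcases (PySem.Set.mem_add s n x).mp hxadd with hxs | hxn
          · exact hall x (List.mem_cons_of_mem _ hx) hxs
          · exact hnin (hxn ▸ hx)

-- the adjacent-pairs test is IsChain (· ≠ ·)
theorem zip_all_ne_iff_isChain (l : List String) :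
    ((l.zip (l.drop 1)).all (fun p => p.1 != p.2)) = true ↔ l.IsChain (· ≠ ·) := by
  induction l with
  | nil => simp
  | cons a l ih =>
    cases l with
    | nil => simp
    | cons b t =>
      simp only [List.drop_succ_cons, List.drop_zero, List.zip_cons_cons, List.all_cons,
        Bool.and_eq_true, bne_iff_ne, ne_eq, List.isChain_cons_cons] at *
      rw [ih]

-- on a (≤)-sorted list, adjacent-distinct is exactly Nodup
theorem isChain_ne_iff_nodup (l : List String) (h : l.Pairwise (· ≤ ·)) :
    l.IsChain (· ≠ ·) ↔ l.Nodup := by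
  constructor
  · intro hc
    have hle : l.IsChain (· ≤ ·) := List.Pairwise.isChain h
    have hlt : l.IsChain (· < ·) := by
      clear h
      induction l with
      | nil => exact List.isChain_nil
      | cons a t ih =>
        cases t with
        | nil => exact List.isChain_singleton a
        | cons b t =>
          rcases List.isChain_cons_cons.mp hc with ⟨hab, hc'⟩
          rcases List.isChain_cons_cons.mp hle with ⟨hab', hle'⟩
          exact List.isChain_cons_cons.mpr ⟨lt_of_le_of_ne hab' hab, ih hc' hle'⟩
    exact (List.isChain_iff_pairwise.mp hlt).imp ne_of_lt
  · intro hn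
    exact List.Pairwise.isChain hn

-- ===== VERDICT (by name: the statement is the Claim_ definition above) =====
theorem is_valid_list_spec : Claim_equal_is_valid_list := by
  intro nums _
  unfold Spec_is_valid_list is_valid_list is_valid_list_alt
  set f := nums.filter (fun n => n != ".") with hf
  set sl := PySem.List.sorted f (fun x => x) false with hsl
  have hA : isValidLoop nums PySem.Set.empty = true ↔ f.Nodup := by
    rw [isValidLoop_iff]
    simp [PySem.Set.empty, ← hf]
  have hperm : sl.Perm f := PySem.List.sorted_perm ..
  have hB : ((sl.zip (sl.drop 1)).all (fun p => p.1 != p.2)) = true ↔ f.Nodup := by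
    rw [zip_all_ne_iff_isChain,
      isChain_ne_iff_nodup sl (by simpa using PySem.List.sorted_pairwise f (fun x => x)),
      hperm.nodup_iff]
  rw [Bool.eq_iff_iff, hA]
  exact hB.symm
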